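-- pv_equiv track=rewrite | github.com/veezor/Nimbus | django/backup_corporativo/bkp/app_views/tmp_restores.py | __restore_step
-- ===== SOURCE A (Python) =====
-- def __restore_step(comp_id=None ,proc_id=None, job_id=None):
--     if all([arg is None for arg in [comp_id,proc_id,job_id]]):
--         return 0
--     elif all([arg is None for arg in [proc_id,job_id]]):
--         return 1
--     elif all([arg is None for arg in [job_id]]):
--         return 2
--     elif all([arg is not None for arg in [comp_id,proc_id,job_id]]):
--         return 3
--     return -1 # Função nunca deverá chegar aqui.
-- ===== SOURCE B (Python) =====
-- _STEP_TABLE = {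
--     (False, False, False): 0,
--     (True,  False, False): 1,
--     (False, True,  False): 2,
--     (True,  True,  False): 2,
--     (True,  True,  True):  3,
--     (False, False, True): -1,
--     (True,  False, True): -1,
--     (False, True,  True): -1,
-- }
--
-- def __restore_step(comp_id=None, proc_id=None, job_id=None):
--     return _STEP_TABLE[(comp_id is not None, proc_id is not None, job_id is not None)]
-- ===== Notes on version B (the rewrite author's own statement) =====
-- stated objective: simpler
-- what changed: Replaces the if/elif cascade of all([...]) list comprehensions with a single lookup of the presence triple (comp_id,proc_id,job_id are not None) in a constant 8-entry table.
import Mathlib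
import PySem

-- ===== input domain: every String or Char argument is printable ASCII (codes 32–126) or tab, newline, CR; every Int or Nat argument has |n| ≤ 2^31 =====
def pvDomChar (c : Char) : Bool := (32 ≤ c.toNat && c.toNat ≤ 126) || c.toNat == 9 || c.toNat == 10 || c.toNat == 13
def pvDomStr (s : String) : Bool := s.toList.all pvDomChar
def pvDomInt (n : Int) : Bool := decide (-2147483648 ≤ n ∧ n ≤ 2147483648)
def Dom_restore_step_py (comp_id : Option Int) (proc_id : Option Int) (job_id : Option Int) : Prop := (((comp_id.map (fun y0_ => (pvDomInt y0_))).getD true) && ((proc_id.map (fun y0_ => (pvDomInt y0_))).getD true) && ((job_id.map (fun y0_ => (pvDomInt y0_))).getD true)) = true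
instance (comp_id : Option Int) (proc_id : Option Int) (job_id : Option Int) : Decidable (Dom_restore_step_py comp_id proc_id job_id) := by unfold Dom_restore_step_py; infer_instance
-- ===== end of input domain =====

-- B replaces A's if/elif cascade with one lookup of the presence triple in a constant 8-entry table (objective: simpler).
-- ===== PORT A =====
def restore_step_py (comp_id : Option Int) (proc_id : Option Int) (job_id : Option Int) : Int :=
  -- if all([arg is None for arg in [comp_id,proc_id,job_id]]): return 0
  if [comp_id, proc_id, job_id].all (fun arg => arg.isNone) then 0
  -- elif all([arg is None for arg in [proc_id,job_id]]): return 1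
  else if [proc_id, job_id].all (fun arg => arg.isNone) then 1
  -- elif all([arg is None for arg in [job_id]]): return 2
  else if [job_id].all (fun arg => arg.isNone) then 2
  -- elif all([arg is not None for arg in [comp_id,proc_id,job_id]]): return 3
  else if [comp_id, proc_id, job_id].all (fun arg => !arg.isNone) then 3
  else -1

-- ===== PORT B =====
-- the constant table _STEP_TABLE, a dict keyed by the presence triple
def pvStepTable : PySem.Dict (Bool × Bool × Bool) Int :=
  (((((((((PySem.Dict.empty).insert (false, false, false) 0).insert
    (true, false, false) 1).insert
    (false, true, false) 2).insert
    (true, true, false) 2).insert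
    (true, true, true) 3).insert
    (false, false, true) (-1)).insert
    (true, false, true) (-1)).insert
    (false, true, true) (-1))

def restore_step_py_alt (comp_id : Option Int) (proc_id : Option Int) (job_id : Option Int) : Int :=
  (pvStepTable.get? (comp_id.isSome, proc_id.isSome, job_id.isSome)).getD 0

-- ===== PRECONDITION & SPEC =====
def Spec_restore_step_py (comp_id : Option Int) (proc_id : Option Int) (job_id : Option Int) (out : Int) : Prop := out = restore_step_py_alt comp_id proc_id job_id
instance (comp_id : Option Int) (proc_id : Option Int) (job_id : Option Int) (out : Int) : Decidable (Spec_restore_step_py comp_id proc_id job_id out) := by unfold Spec_restore_step_py; infer_instance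

-- ===== CLAIM (what is proved, stated in full; the proofs are below) =====
def Claim_equal_restore_step_py : Prop := ∀ (comp_id : Option Int) (proc_id : Option Int) (job_id : Option Int), Dom_restore_step_py comp_id proc_id job_id → Spec_restore_step_py comp_id proc_id job_id (restore_step_py comp_id proc_id job_id)

-- ===== LEMMAS AND PROOFS =====

-- ===== VERDICT (by name: the statement is the Claim_ definition above) =====
theorem restore_step_py_spec : Claim_equal_restore_step_py := by
  intro comp_id proc_id job_id _
  unfold Spec_restore_step_py restore_step_py restore_step_py_alt
  rcases comp_id <;> rcases proc_id <;> rcases job_id <;> simp [pvStepTable, PySem.Dict.get?, PySem.Dict.insert, PySem.Dict.empty]
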